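-- pv_equiv track=rewrite | github.com/Isaias301/Questions-URI | 1534.py | nova_matriz
-- ===== SOURCE A (Python) =====
-- def nova_matriz(colunas, linhas):
--     # crio a matriz
--     matriz = ["1"] * colunas
--
--     # crio as colunas
--     for i in range(len(matriz)):
--         matriz[i] = ["1"] * colunas
--
--     # faço o tratamento para as posições variar de 1 a 3
--     b = colunas-1
--     for i in range(len(matriz)):
--
--         for j in range(len(matriz[i])):
--             if i == j:
--                 matriz[i][j] = 1
--             else:
--                 matriz[i][j] = 3
--             if j == b:
--                 matriz[i][j] = 2
--         b -= 1
--     return matriz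
-- ===== SOURCE B (Python) =====
-- def nova_matriz(colunas, linhas):
--     # fill everything with 3, then overwrite the main diagonal with 1
--     # and, last, the anti-diagonal with 2 (so the center cell is 2)
--     matriz = [[3] * colunas for _ in range(colunas)]
--     for i in range(colunas):
--         matriz[i][i] = 1
--     for i in range(colunas):
--         matriz[i][colunas - 1 - i] = 2
--     return matriz
-- ===== Notes on version B (the rewrite author's own statement) =====
-- stated objective: simpler
-- what changed: replaces the per-cell if/else classification inside nested loops (with a manually decremented anti-diagonal counter) by filling the whole matrix with 3 and then overwriting the main diagonal and, last, the anti-diagonal in two single-index passes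
import Mathlib
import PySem

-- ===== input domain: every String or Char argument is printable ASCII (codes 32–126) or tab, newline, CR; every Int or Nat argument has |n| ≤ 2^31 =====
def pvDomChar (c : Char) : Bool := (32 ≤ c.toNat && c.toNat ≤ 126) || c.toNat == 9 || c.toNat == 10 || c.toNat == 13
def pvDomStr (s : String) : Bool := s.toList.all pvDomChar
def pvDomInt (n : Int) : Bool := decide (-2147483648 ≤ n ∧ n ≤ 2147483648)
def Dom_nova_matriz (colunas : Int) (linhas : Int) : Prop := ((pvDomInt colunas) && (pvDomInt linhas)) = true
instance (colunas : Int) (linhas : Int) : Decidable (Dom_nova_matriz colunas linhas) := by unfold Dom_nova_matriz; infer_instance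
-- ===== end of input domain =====

-- B fills the whole colunas×colunas matrix with 3 and then overwrites the main diagonal (1)
-- and, last, the anti-diagonal (2) in two single-index passes, instead of A's per-cell
-- if/else classification inside nested loops with a decremented counter.


-- ===== PORT A =====
-- matriz = ["1"] * colunas builds a list of placeholder strings, each of which is replaced by a
-- row in the first loop; the inner rows' "1" strings are all overwritten with ints before return,
-- so the placeholders are ported as [] (outer) and 0 (inner) — no placeholder survives to the output.
def nova_matriz (colunas : Int) (linhas : Int) : List (List Int) :=
  let matriz : List (List Int) := List.replicate colunas.toNat []        -- ["1"] * colunas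
  let matriz := (List.range matriz.length).foldl
    (fun m i => m.set i (List.replicate colunas.toNat (0 : Int))) matriz -- matriz[i] = ["1"]*colunas
  let b : Int := colunas - 1
  ((List.range matriz.length).foldl
    (fun (p : List (List Int) × Int) (i : Nat) =>
      let m := p.1
      let row := m.getD i []
      let row := (List.range row.length).foldl
        (fun (r : List Int) (j : Nat) =>
          let r := if i = j then r.set j 1 else r.set j 3
          if (j : Int) = p.2 then r.set j 2 else r) row
      (m.set i row, p.2 - 1))
    (matriz, b)).1

-- ===== PORT B =====
def nova_matriz_alt (colunas : Int) (linhas : Int) : List (List Int) :=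
  let n := colunas.toNat
  let matriz : List (List Int) := List.replicate n (List.replicate n (3 : Int))
  let matriz := (List.range n).foldl (fun m i => m.set i ((m.getD i []).set i 1)) matriz
  (List.range n).foldl (fun m i => m.set i ((m.getD i []).set (n - 1 - i) 2)) matriz

-- ===== PRECONDITION & SPEC =====
def Spec_nova_matriz (colunas : Int) (linhas : Int) (out : List (List Int)) : Prop := out = nova_matriz_alt colunas linhas
instance (colunas : Int) (linhas : Int) (out : List (List Int)) : Decidable (Spec_nova_matriz colunas linhas out) := by unfold Spec_nova_matriz; infer_instance

-- ===== CLAIM (what is proved, stated in full; the proofs are below) =====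
def Claim_equal_nova_matriz : Prop := ∀ (colunas : Int) (linhas : Int), Dom_nova_matriz colunas linhas → Spec_nova_matriz colunas linhas (nova_matriz colunas linhas)

-- ===== LEMMAS AND PROOFS =====

/-- A fold over `range n` that at step `i` replaces entry `i` by a function of `i` and the
current entry `i` rewrites each entry with index `< n` once (earlier steps never touch it). -/
theorem upd_range {α : Type} (g : Nat → α → α) (d : α) :
    ∀ (n : Nat) (m : List α),
    (List.range n).foldl (fun m i => m.set i (g i (m.getD i d))) m
      = m.mapIdx (fun i x => if i < n then g i x else x) := by
  intro n
  induction n with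
  | zero =>
      intro m
      apply List.ext_getElem
      · simp
      · intro i h1 h2
        simp
  | succ n ih =>
      intro m
      rw [List.range_succ, List.foldl_append, ih]
      simp only [List.foldl_cons, List.foldl_nil]
      apply List.ext_getElem
      · simp
      · intro i h1 h2
        have hi : i < m.length := by simpa using h2
        simp only [List.getElem_set, List.getElem_mapIdx]
        by_cases hne : n = i
        · subst hne
          simp [List.getD, List.getElem?_eq_getElem hi, Nat.lt_succ_self]
        · by_cases h : i < n
          · simp [hne, h, Nat.lt_succ_of_lt h]
          · have h' : ¬ i < n + 1 := by omega
            simp [hne, h, h']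

/-- `upd_range` with the step function given up to pointwise equality (to match a port's
literal lambda without higher-order rewriting). -/
theorem upd_range' {α : Type} (g : Nat → α → α) (d : α) (F : List α → Nat → List α)
    (hF : ∀ m i, F m i = m.set i (g i (m.getD i d))) (n : Nat) (m : List α) :
    (List.range n).foldl F m = m.mapIdx (fun i x => if i < n then g i x else x) := by
  have : F = fun m i => m.set i (g i (m.getD i d)) := funext fun m => funext fun i => hF m i
  rw [this]
  exact upd_range g d n m

/-- A's outer loop carries the pair (matrix, decremented `b`); with `b = B0 - s` at the start
of `range' s k`, it equals the plain fold where step `i` uses `B0 - i` directly. -/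
theorem pairfold {α : Type} (step : Nat → Int → α → α) (B0 : Int) :
    ∀ (k s : Nat) (m : α),
    ((List.range' s k).foldl (fun (p : α × Int) (i : Nat) => (step i p.2 p.1, p.2 - 1)) (m, B0 - s)).1
      = (List.range' s k).foldl (fun m i => step i (B0 - i) m) m := by
  intro k
  induction k with
  | zero => intro s m; simp
  | succ k ih =>
      intro s m
      rw [List.range'_succ]
      simp only [List.foldl_cons]
      have hb : B0 - (s : Int) - 1 = B0 - ((s + 1 : Nat) : Int) := by push_cast; ring
      rw [hb, ih]

/-- `pairfold` from `s = 0`, with the pair step given up to pointwise equality. -/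
theorem pairfold' {α : Type} (step : Nat → Int → α → α) (B0 : Int)
    (F : α × Int → Nat → α × Int) (hF : ∀ p i, F p i = (step i p.2 p.1, p.2 - 1))
    (n : Nat) (m : α) :
    ((List.range n).foldl F (m, B0)).1 = (List.range n).foldl (fun m i => step i (B0 - i) m) m := by
  have hFe : F = fun (p : α × Int) (i : Nat) => (step i p.2 p.1, p.2 - 1) :=
    funext fun p => funext fun i => hF p i
  rw [hFe, List.range_eq_range']
  simpa using pairfold step B0 n 0 m

/-- Updating every slot of a replicated list, slot by slot. -/
theorem mapIdx_replicate_fill {α : Type} (n : Nat) (d : α) (g : Nat → α → α) :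
    (List.replicate n d).mapIdx (fun i x => if i < n then g i x else x)
      = (List.range n).map (fun i => g i d) := by
  apply List.ext_getElem
  · simp
  · intro i h1 h2
    have : i < n := by simpa using h2
    simp [this]

set_option maxRecDepth 8000 in
theorem nova_matriz_eq_alt (colunas linhas : Int) :
    nova_matriz colunas linhas = nova_matriz_alt colunas linhas := by
  unfold nova_matriz nova_matriz_alt
  simp only [List.length_replicate]
  set n := colunas.toNat with hn
  -- A, first loop: every placeholder replaced by a row of zeros
  rw [upd_range' (fun (_ : Nat) (_ : List Int) => List.replicate n (0 : Int)) []
        _ (fun _ _ => rfl) n (List.replicate n []),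
      mapIdx_replicate_fill]
  have hrow : (List.range n).map (fun _ => List.replicate n (0 : Int))
      = List.replicate n (List.replicate n (0 : Int)) := by
    apply List.ext_getElem <;> simp
  simp only [hrow, List.length_replicate]
  -- A, outer loop: eliminate the decremented pair state
  rw [pairfold' (fun (i : Nat) (b : Int) (m : List (List Int)) =>
        m.set i ((List.range (m.getD i []).length).foldl
          (fun (r : List Int) (j : Nat) =>
            let r := if i = j then r.set j 1 else r.set j 3
            if (j : Int) = b then r.set j 2 else r) (m.getD i [])))
      (colunas - 1) _ (fun p i => rfl) n]
  -- A, outer loop as a per-row update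
  rw [upd_range' (fun (i : Nat) (x : List Int) =>
        (List.range x.length).foldl
          (fun (r : List Int) (j : Nat) =>
            let r := if i = j then r.set j 1 else r.set j 3
            if (j : Int) = colunas - 1 - (i : Int) then r.set j 2 else r) x)
      [] _ (fun m i => rfl) n, mapIdx_replicate_fill]
  -- A, inner loop on a row of zeros: each cell is set once, to its final value
  have hinner : ∀ i : Nat,
      (List.range (List.replicate n (0 : Int)).length).foldl
          (fun (r : List Int) (j : Nat) =>
            let r := if i = j then r.set j 1 else r.set j 3
            if (j : Int) = colunas - 1 - (i : Int) then r.set j 2 else r)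
          (List.replicate n (0 : Int))
        = (List.range n).map (fun (j : Nat) =>
            if (j : Int) = colunas - 1 - (i : Int) then (2 : Int)
            else if i = j then 1 else 3) := by
    intro i
    simp only [List.length_replicate]
    rw [upd_range' (fun (j : Nat) (_ : Int) =>
          if (j : Int) = colunas - 1 - (i : Int) then (2 : Int)
          else if i = j then 1 else 3) 0
        _ (by
            intro r j
            by_cases hij : i = j
            · by_cases hb : (j : Int) = colunas - 1 - (i : Int)
              · simp only [if_pos hij, if_pos hb, List.set_set]
              · simp only [if_pos hij, if_neg hb]
            · by_cases hb : (j : Int) = colunas - 1 - (i : Int)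
              · simp only [if_neg hij, if_pos hb, List.set_set]
              · simp only [if_neg hij, if_neg hb])
        n (List.replicate n 0), mapIdx_replicate_fill]
  -- B, diagonal loop
  rw [upd_range' (fun (i : Nat) (x : List Int) => x.set i 1) []
        _ (fun m i => rfl) n (List.replicate n (List.replicate n (3 : Int))),
      mapIdx_replicate_fill]
  -- B, anti-diagonal loop
  rw [upd_range' (fun (i : Nat) (x : List Int) => x.set (n - 1 - i) 2) []
        _ (fun m i => rfl) n]
  -- compare cell by cell
  apply List.ext_getElem
  · simp
  · intro i h1 h2
    have hi : i < n := by simpa using h1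
    have hci : (n : Int) = colunas := by omega
    simp only [List.getElem_map, List.getElem_mapIdx, List.getElem_range, hi, if_pos]
    rw [hinner i]
    apply List.ext_getElem
    · simp
    · intro j h3 h4
      have hj : j < n := by simpa using h3
      simp only [List.getElem_set, List.getElem_map, List.getElem_range,
        List.getElem_replicate]
      split_ifs <;> first | rfl | omega

-- ===== VERDICT (by name: the statement is the Claim_ definition above) =====
theorem nova_matriz_spec : Claim_equal_nova_matriz := by
  intro colunas linhas _
  unfold Spec_nova_matriz
  exact nova_matriz_eq_alt colunas linhas
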